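-- pv_equiv track=rewrite | github.com/AnnaDezsi/Algoritm | hashtab.py | suma_nume
-- ===== SOURCE A (Python) =====
-- def suma_cuvant(cuvant):
--     ht = {"a" : 200, "b" : 300, "c" : 1, "d" : 40, "e" : 50, "f" : 60, "g" : 70, "h" : 80, "i" :90,
--           "j" : 1, "k" : 2, "l" : 3, "m" : 4, "n" : 5, "o" : 6, "p" : 7, "q" : 8, "r" : 9, "s" : 10, "t" : 11,
--           "u" : 12, "v" : 13, "w" : 14, "x" : 15, "y" : 16, "z" : 17}
--     suma = 0
--     for el in cuvant:
--         suma += ht[el]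
--     return suma
--
-- def suma_nume(lista):
--     max = 0
--     maxN = " "
--     for el in lista:
--         vc = suma_cuvant(el)
--         if vc > max :
--             max=vc
--             maxN = el
--     return maxN
-- ===== SOURCE B (Python) =====
-- def suma_cuvant(cuvant):
--     ht = {"a": 200, "b": 300, "c": 1, "d": 40, "e": 50, "f": 60, "g": 70, "h": 80, "i": 90,
--           "j": 1, "k": 2, "l": 3, "m": 4, "n": 5, "o": 6, "p": 7, "q": 8, "r": 9, "s": 10, "t": 11,
--           "u": 12, "v": 13, "w": 14, "x": 15, "y": 16, "z": 17}
--     return sum(ht[c] for c in cuvant)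
--
-- def suma_nume(lista):
--     scores = [suma_cuvant(w) for w in lista]
--     m = max(scores, default=0)
--     return lista[scores.index(m)] if m > 0 else " "
-- ===== Notes on version B (the rewrite author's own statement) =====
-- stated objective: idiomatic
-- what changed: Replaced the manual running-max loop (tracking max and maxN in one pass) with a score list built by comprehension, the built-in max with default=0, and an index lookup for the first word attaining the maximum.
import Mathlib
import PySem

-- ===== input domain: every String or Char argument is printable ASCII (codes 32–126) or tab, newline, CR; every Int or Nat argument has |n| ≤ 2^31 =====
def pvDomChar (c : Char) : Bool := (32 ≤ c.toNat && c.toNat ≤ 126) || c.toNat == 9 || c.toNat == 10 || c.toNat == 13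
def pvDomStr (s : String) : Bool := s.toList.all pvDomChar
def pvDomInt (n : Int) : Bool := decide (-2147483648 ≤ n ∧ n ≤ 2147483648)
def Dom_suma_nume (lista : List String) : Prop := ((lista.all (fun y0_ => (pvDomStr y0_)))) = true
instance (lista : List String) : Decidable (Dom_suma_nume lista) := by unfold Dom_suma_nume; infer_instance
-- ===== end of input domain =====

-- B replaces A's manual running-max loop with a score list, built-in max (default 0) and a first-index lookup; same results, same cost.


-- ===== PORT A =====
-- the dict ht, shared data of both Pythons; hand port of ht[c]: 0 stands for KeyError,
-- which Pre_suma_nume excludes (exact on chars 'a'..'z')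
def htScore (c : Char) : Int :=
  match c with
  | 'a' => 200 | 'b' => 300 | 'c' => 1 | 'd' => 40 | 'e' => 50 | 'f' => 60
  | 'g' => 70 | 'h' => 80 | 'i' => 90 | 'j' => 1 | 'k' => 2 | 'l' => 3
  | 'm' => 4 | 'n' => 5 | 'o' => 6 | 'p' => 7 | 'q' => 8 | 'r' => 9
  | 's' => 10 | 't' => 11 | 'u' => 12 | 'v' => 13 | 'w' => 14 | 'x' => 15
  | 'y' => 16 | 'z' => 17 | _ => 0

-- A's suma_cuvant: running sum over the characters
def suma_cuvant (cuvant : String) : Int :=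
  cuvant.toList.foldl (fun suma el => suma + htScore el) 0

-- A: single pass tracking (max, maxN), strict '>' keeps the first maximum
def suma_nume (lista : List String) : String :=
  (lista.foldl
    (fun (acc : Int × String) el =>
      let vc := suma_cuvant el
      if vc > acc.1 then (vc, el) else acc)
    (0, " ")).2

-- ===== PORT B =====
-- B's suma_cuvant: sum of a mapped comprehension
def suma_cuvant_alt (cuvant : String) : Int :=
  (cuvant.toList.map (fun c => htScore c)).sum

-- B: score list, max(scores, default=0), then lista[scores.index(m)]
-- port of max(scores, default=0): running max seeded with the head, 0 when empty
def pyMaxD (scores : List Int) : Int :=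
  match scores with | [] => 0 | x :: t => t.foldl max x

def suma_nume_alt (lista : List String) : String :=
  let scores := lista.map suma_cuvant_alt
  let m : Int := pyMaxD scores
  if m > 0 then
    match PySem.List.index? scores m with
    | some i => lista.getD i " "   -- index is always in range: m ∈ scores here
    | none => " "                  -- unreachable: m > 0 implies m ∈ scores
  else " "

-- ===== PRECONDITION & SPEC =====
-- Pre_ excludes exactly the inputs on which A raises KeyError: a character outside 'a'..'z' (codes 97-122)
def Pre_suma_nume (lista : List String) : Prop :=
  (lista.all (fun w => w.toList.all (fun c => 97 ≤ c.toNat && c.toNat ≤ 122))) = true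
instance (lista : List String) : Decidable (Pre_suma_nume lista) := by
  unfold Pre_suma_nume; infer_instance

def pvWitness_suma_nume : List String := (["ab", "c"])

def Spec_suma_nume (lista : List String) (out : String) : Prop := out = suma_nume_alt lista
instance (lista : List String) (out : String) : Decidable (Spec_suma_nume lista out) := by
  unfold Spec_suma_nume; infer_instance

-- ===== CLAIM (what is proved, stated in full; the proofs are below) =====
def Claim_equal_suma_nume : Prop :=
  ∀ (lista : List String), Dom_suma_nume lista → Pre_suma_nume lista → Spec_suma_nume lista (suma_nume lista)

-- ===== LEMMAS AND PROOFS =====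

theorem htScore_nonneg (c : Char) : 0 ≤ htScore c := by
  unfold htScore; split <;> decide

theorem suma_cuvant_eq_alt (w : String) : suma_cuvant w = suma_cuvant_alt w := by
  unfold suma_cuvant suma_cuvant_alt
  have h : ∀ (l : List Char) (a : Int),
      l.foldl (fun suma el => suma + htScore el) a = a + (l.map (fun c => htScore c)).sum := by
    intro l
    induction l with
    | nil => simp
    | cons x t ih => intro a; simp [List.foldl_cons, ih]; ring
  simpa using h w.toList 0

theorem suma_cuvant_alt_nonneg (w : String) : 0 ≤ suma_cuvant_alt w := by
  unfold suma_cuvant_alt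
  induction w.toList with
  | nil => simp
  | cons x t ih =>
    simp only [List.map_cons, List.sum_cons]
    have := htScore_nonneg x
    omega

-- max over the scores, seeded with 0 (all scores are nonnegative)
def maxScore (l : List String) : Int :=
  (l.map suma_cuvant_alt).foldl max 0

theorem le_foldl_max_self (l : List Int) (a : Int) : a ≤ l.foldl max a := by
  induction l generalizing a with
  | nil => simp
  | cons x t ih => exact le_trans (le_max_left a x) (ih (max a x))

theorem mem_le_foldl_max {l : List Int} {x : Int} (hx : x ∈ l) (a : Int) :
    x ≤ l.foldl max a := by
  induction l generalizing a with
  | nil => exact absurd hx (List.not_mem_nil)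
  | cons y t ih =>
    rcases List.mem_cons.mp hx with h | h
    · subst h; exact le_trans (le_max_right a x) (le_foldl_max_self t _)
    · exact ih h _

theorem foldl_max_mem_or (l : List Int) (a : Int) :
    l.foldl max a = a ∨ l.foldl max a ∈ l := by
  induction l generalizing a with
  | nil => left; rfl
  | cons x t ih =>
    rcases ih (max a x) with h | h
    · rcases le_total x a with hxa | hax
      · left; rw [List.foldl_cons, h, max_eq_left hxa]
      · right
        rw [List.foldl_cons, h, max_eq_right hax]
        exact List.mem_cons_self
    · right
      rw [List.foldl_cons]
      exact List.mem_cons_of_mem _ h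

theorem maxScore_nonneg (l : List String) : 0 ≤ maxScore l :=
  le_foldl_max_self _ _

theorem maxScore_append (l : List String) (w : String) :
    maxScore (l ++ [w]) = max (maxScore l) (suma_cuvant_alt w) := by
  unfold maxScore
  simp [List.foldl_append]

-- B's m equals maxScore (because every score is nonnegative)
theorem alt_m_eq (l : List String) :
    pyMaxD (l.map suma_cuvant_alt) = maxScore l := by
  unfold pyMaxD maxScore
  cases h : l.map suma_cuvant_alt with
  | nil => simp
  | cons x t =>
    have hx : 0 ≤ x := by
      have : x ∈ l.map suma_cuvant_alt := by rw [h]; exact List.mem_cons_self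
      rcases List.mem_map.mp this with ⟨w, _, hw⟩
      rw [← hw]; exact suma_cuvant_alt_nonneg w
    simp [List.foldl_cons, max_eq_right hx]

-- closed form of B with the lets zeta-reduced and m rewritten to maxScore
theorem alt_closed (L : List String) :
    suma_nume_alt L =
      (if maxScore L > 0 then
        match PySem.List.index? (L.map suma_cuvant_alt) (maxScore L) with
        | some i => L.getD i " "
        | none => " "
      else " ") := by
  unfold suma_nume_alt
  simp only [alt_m_eq]

-- the combined loop invariant for A's fold, by induction from the back
theorem A_fold_char (l : List String) :
    (l.foldl
      (fun (acc : Int × String) el =>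
        let vc := suma_cuvant el
        if vc > acc.1 then (vc, el) else acc)
      (0, " ")) = (maxScore l, suma_nume_alt l) := by
  induction l using List.reverseRecOn with
  | nil => simp [maxScore, suma_nume_alt]
  | append_singleton l w ih =>
    rw [List.foldl_append, ih]
    simp only [List.foldl_cons, List.foldl_nil]
    rw [suma_cuvant_eq_alt]
    rw [alt_closed, alt_closed, maxScore_append]
    by_cases hgt : suma_cuvant_alt w > maxScore l
    · -- new strict maximum: both sides return w
      have hmax : max (maxScore l) (suma_cuvant_alt w) = suma_cuvant_alt w :=
        max_eq_right (le_of_lt hgt)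
      have hpos : (0:Int) < suma_cuvant_alt w := lt_of_le_of_lt (maxScore_nonneg l) hgt
      have hnotmem : suma_cuvant_alt w ∉ l.map suma_cuvant_alt := by
        intro hmem
        exact absurd (mem_le_foldl_max hmem 0) (by unfold maxScore at hgt; omega)
      have hidx : PySem.List.index? ((l ++ [w]).map suma_cuvant_alt) (suma_cuvant_alt w)
          = some (l.map suma_cuvant_alt).length := by
        rw [List.map_append, List.map_singleton]
        exact PySem.List.index?_append_singleton_self _ _ hnotmem
      simp only [if_pos hgt, hmax, if_pos hpos, hidx]
      simp [List.getD]
    · -- old maximum stands: both sides return the old answer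
      have hle : suma_cuvant_alt w ≤ maxScore l := not_lt.mp hgt
      have hmax : max (maxScore l) (suma_cuvant_alt w) = maxScore l := max_eq_left hle
      simp only [if_neg hgt, hmax]
      by_cases hpos : (0:Int) < maxScore l
      · have hmem : maxScore l ∈ l.map suma_cuvant_alt := by
          rcases foldl_max_mem_or (l.map suma_cuvant_alt) 0 with h | h
          · exfalso; unfold maxScore at hpos; omega
          · exact h
        have hidx : PySem.List.index? ((l ++ [w]).map suma_cuvant_alt) (maxScore l)
            = PySem.List.index? (l.map suma_cuvant_alt) (maxScore l) := by
          rw [List.map_append]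
          exact PySem.List.index?_append_of_mem _ hmem
        simp only [if_pos hpos, hidx]
        cases hi : PySem.List.index? (l.map suma_cuvant_alt) (maxScore l) with
        | none => rfl
        | some i =>
          obtain ⟨hk, _, _⟩ := PySem.List.getElem_of_index?_eq_some hi
          have hlen : i < l.length := by simpa using hk
          simp [List.getD, List.getElem?_append_left hlen]
      · simp [if_neg hpos]

theorem suma_nume_eq_alt (lista : List String) : suma_nume lista = suma_nume_alt lista := by
  unfold suma_nume
  rw [A_fold_char]

-- ===== VERDICT (by name: the statement is the Claim_ definition above) =====
theorem suma_nume_spec : Claim_equal_suma_nume := by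
  intro lista _ _
  unfold Spec_suma_nume
  exact suma_nume_eq_alt lista
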